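-- pv_equiv track=rewrite | github.com/msarchioto/turbalance-simulation-task | src/clos_generator/visualize.py | _parse_topology
-- ===== SOURCE A (Python) =====
-- def _parse_topology(links: list[list[int]]) -> dict:
--     """Derive topology structure from the link list."""
--     all_ids: set[int] = set()
--     for src, dst, _ in links:
--         all_ids.add(src)
--         all_ids.add(dst)
--
--     # Hosts are sources of host-leaf links (lowest IDs)
--     # Spines are destinations of leaf-spine links (highest IDs)
--     # Leafs are in between
--     src_only = {src for src, dst, _ in links} - {dst for _, dst, _ in links}
--     dst_only = {dst for _, dst, _ in links} - {src for src, dst, _ in links}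
--     middle = all_ids - src_only - dst_only
--
--     hosts = sorted(src_only)
--     spines = sorted(dst_only)
--     leafs = sorted(middle)
--
--     return {"hosts": hosts, "leafs": leafs, "spines": spines}
-- ===== SOURCE B (Python) =====
-- def _parse_topology(links: list[list[int]]) -> dict:
--     """Derive topology structure from the link list."""
--     # One pass: per-node flags (appears-as-source, appears-as-destination).
--     flags: dict[int, tuple[bool, bool]] = {}
--     for src, dst, _ in links:
--         fs = flags.get(src, (False, False))
--         flags[src] = (True, fs[1])
--         fd = flags.get(dst, (False, False))
--         flags[dst] = (fd[0], True)
--     hosts, leafs, spines = [], [], []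
--     for node, (is_src, is_dst) in flags.items():
--         if is_src and is_dst:
--             leafs.append(node)
--         elif is_src:
--             hosts.append(node)
--         else:
--             spines.append(node)
--     return {"hosts": sorted(hosts), "leafs": sorted(leafs), "spines": sorted(spines)}
-- ===== Notes on version B (the rewrite author's own statement) =====
-- stated objective: alternative
-- what changed: Replaces A's five set comprehensions and set-difference algebra with a single pass that records per-node (is-source, is-destination) flags in one dict, then one classification loop over that dict; links are traversed once instead of five times.
import Mathlib
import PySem

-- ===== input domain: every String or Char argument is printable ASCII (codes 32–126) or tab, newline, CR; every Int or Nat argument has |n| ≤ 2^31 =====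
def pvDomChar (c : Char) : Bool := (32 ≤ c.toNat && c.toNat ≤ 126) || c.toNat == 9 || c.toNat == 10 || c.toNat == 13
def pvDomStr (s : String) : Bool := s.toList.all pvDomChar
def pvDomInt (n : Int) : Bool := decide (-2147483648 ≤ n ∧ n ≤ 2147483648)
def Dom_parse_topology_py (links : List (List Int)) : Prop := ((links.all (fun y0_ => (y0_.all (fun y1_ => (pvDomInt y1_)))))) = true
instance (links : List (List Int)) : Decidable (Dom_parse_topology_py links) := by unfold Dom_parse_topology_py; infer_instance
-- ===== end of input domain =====

-- B replaces A's set-difference algebra by one pass recording per-node (is-source, is-destination)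
-- flags in a dict plus one classification loop; same asymptotic cost, different decomposition.


-- ===== PORT A =====
-- Python's 'src, dst, _ = link' (Pre_ guarantees length 3; the default is never reached inside Pre_)
def pvUnpackA (l : List Int) : Int × Int :=
  match l with
  | s :: d :: _ => (s, d)
  | _ => (0, 0)

def parse_topology_py (links : List (List Int)) : List (String × List Int) :=
  let all_ids : PySem.Set Int :=
    links.foldl (fun s l => PySem.Set.add (PySem.Set.add s (pvUnpackA l).1) (pvUnpackA l).2)
      PySem.Set.empty
  let src_only := PySem.Set.diff (PySem.Set.ofList (links.map (fun l => (pvUnpackA l).1)))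
                                 (PySem.Set.ofList (links.map (fun l => (pvUnpackA l).2)))
  let dst_only := PySem.Set.diff (PySem.Set.ofList (links.map (fun l => (pvUnpackA l).2)))
                                 (PySem.Set.ofList (links.map (fun l => (pvUnpackA l).1)))
  let middle := PySem.Set.diff (PySem.Set.diff all_ids src_only) dst_only
  let hosts := PySem.List.sorted src_only (fun x => x) false
  let spines := PySem.List.sorted dst_only (fun x => x) false
  let leafs := PySem.List.sorted middle (fun x => x) false
  [("hosts", hosts), ("leafs", leafs), ("spines", spines)]

-- ===== PORT B =====
-- Python's 'src, dst, _ = link' in B (same domain; default unreached inside Pre_)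
def pvUnpackB (l : List Int) : Int × Int :=
  match l with
  | s :: d :: _ => (s, d)
  | _ => (0, 0)

-- one pass: flags[node] = (appears-as-source, appears-as-destination)
def pvFlagStep (d : PySem.Dict Int (Bool × Bool)) (l : List Int) : PySem.Dict Int (Bool × Bool) :=
  let s := (pvUnpackB l).1
  let t := (pvUnpackB l).2
  let fs := d.getD s (false, false)
  let d1 := d.insert s (true, fs.2)
  let fd := d1.getD t (false, false)
  d1.insert t (fd.1, true)

-- the classification loop over flags.items()
def pvClassStep (acc : List Int × List Int × List Int) (kv : Int × (Bool × Bool)) :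
    List Int × List Int × List Int :=
  if kv.2.1 && kv.2.2 then (acc.1, acc.2.1 ++ [kv.1], acc.2.2)
  else if kv.2.1 then (acc.1 ++ [kv.1], acc.2.1, acc.2.2)
  else (acc.1, acc.2.1, acc.2.2 ++ [kv.1])

def parse_topology_py_alt (links : List (List Int)) : List (String × List Int) :=
  let flags := links.foldl pvFlagStep PySem.Dict.empty
  let tri := flags.items.foldl pvClassStep (([], [], []) : List Int × List Int × List Int)
  [("hosts", PySem.List.sorted tri.1 (fun x => x) false),
   ("leafs", PySem.List.sorted tri.2.1 (fun x => x) false),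
   ("spines", PySem.List.sorted tri.2.2 (fun x => x) false)]

-- ===== PRECONDITION & SPEC =====
-- Pre_ excludes links that are not 3-element lists: Python's 'src, dst, _ = link' raises ValueError there.
def Pre_parse_topology_py (links : List (List Int)) : Prop := ∀ l ∈ links, l.length = 3
instance (links : List (List Int)) : Decidable (Pre_parse_topology_py links) := by
  unfold Pre_parse_topology_py; infer_instance

def pvWitness_parse_topology_py : List (List Int) := [[0, 2, 10], [1, 2, 10], [2, 4, 40], [3, 4, 40]]

def Spec_parse_topology_py (links : List (List Int)) (out : List (String × List Int)) : Prop := out = parse_topology_py_alt links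
instance (links : List (List Int)) (out : List (String × List Int)) : Decidable (Spec_parse_topology_py links out) := by unfold Spec_parse_topology_py; infer_instance

-- ===== CLAIM (what is proved, stated in full; the proofs are below) =====
def Claim_equal_parse_topology_py : Prop := ∀ (links : List (List Int)), Dom_parse_topology_py links → Pre_parse_topology_py links → Spec_parse_topology_py links (parse_topology_py links)

-- ===== LEMMAS AND PROOFS =====

theorem pvUnpackB_eq : pvUnpackB = pvUnpackA := rfl

-- membership in A's all_ids fold (two Set.adds per link)
theorem mem_allIds (links : List (List Int)) (s : PySem.Set Int) (x : Int) :
    x ∈ links.foldl (fun s l => PySem.Set.add (PySem.Set.add s (pvUnpackA l).1) (pvUnpackA l).2) s ↔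
      x ∈ s ∨ x ∈ links.map (fun l => (pvUnpackA l).1) ∨ x ∈ links.map (fun l => (pvUnpackA l).2) := by
  induction links generalizing s with
  | nil => simp
  | cons l ls ih =>
    simp only [List.foldl_cons, ih, PySem.Set.mem_add, List.map_cons, List.mem_cons]
    tauto

-- A's all_ids fold keeps Nodup
theorem nodup_allIds (links : List (List Int)) (s : PySem.Set Int) (hs : s.Nodup) :
    (links.foldl (fun s l => PySem.Set.add (PySem.Set.add s (pvUnpackA l).1) (pvUnpackA l).2) s).Nodup := by
  induction links generalizing s with
  | nil => exact hs
  | cons l ls ih => exact ih _ (PySem.Set.nodup_add _ _ (PySem.Set.nodup_add _ _ hs))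

-- the "combine" shape of B's flag dict lookup
def pvComb (o : Option (Bool × Bool)) (a b : Bool) : Option (Bool × Bool) :=
  if a || b || o.isSome then some ((o.getD (false, false)).1 || a, (o.getD (false, false)).2 || b)
  else none

theorem pvComb_false_false (o : Option (Bool × Bool)) : pvComb o false false = o := by
  cases o with
  | none => rfl
  | some p => simp [pvComb]

theorem pvComb_comb (o : Option (Bool × Bool)) (a b a' b' : Bool) :
    pvComb (pvComb o a b) a' b' = pvComb o (a || a') (b || b') := by
  cases o with
  | none => cases a <;> cases b <;> cases a' <;> cases b' <;> simp [pvComb]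
  | some p => cases a <;> cases b <;> cases a' <;> cases b' <;> simp [pvComb]

theorem flag_two_inserts (d : PySem.Dict Int (Bool × Bool)) (s t x : Int) :
    ((d.insert s (true, (d.getD s (false, false)).2)).insert t
       (((d.insert s (true, (d.getD s (false, false)).2)).getD t (false, false)).1, true)).get? x =
      pvComb (d.get? x) (decide (x = s)) (decide (x = t)) := by
  by_cases ht : x = t
  · subst ht
    by_cases hs : x = s
    · subst hs
      simp [pvComb, PySem.Dict.getD_eq_get?_getD]
    · simp [PySem.Dict.get?_insert, hs, pvComb, PySem.Dict.getD_eq_get?_getD]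
  · by_cases hs : x = s
    · subst hs
      simp [PySem.Dict.get?_insert, ht, pvComb, PySem.Dict.getD_eq_get?_getD]
    · simp [PySem.Dict.get?_insert, ht, hs, pvComb_false_false]

theorem get?_pvFlagStep (d : PySem.Dict Int (Bool × Bool)) (l : List Int) (x : Int) :
    (pvFlagStep d l).get? x =
      pvComb (d.get? x) (decide (x = (pvUnpackB l).1)) (decide (x = (pvUnpackB l).2)) := by
  unfold pvFlagStep
  exact flag_two_inserts d _ _ x

theorem get?_flags (links : List (List Int)) (d : PySem.Dict Int (Bool × Bool)) (x : Int) :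
    (links.foldl pvFlagStep d).get? x =
      pvComb (d.get? x) (decide (x ∈ links.map (fun l => (pvUnpackB l).1)))
        (decide (x ∈ links.map (fun l => (pvUnpackB l).2))) := by
  induction links generalizing d with
  | nil => simp [pvComb_false_false]
  | cons l ls ih =>
    simp only [List.foldl_cons, ih, get?_pvFlagStep, pvComb_comb, List.map_cons, List.mem_cons]
    congr 1 <;> simp

theorem nodup_keys_flags (links : List (List Int)) (d : PySem.Dict Int (Bool × Bool))
    (hd : d.keys.Nodup) : (links.foldl pvFlagStep d).keys.Nodup := by
  induction links generalizing d with
  | nil => exact hd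
  | cons l ls ih =>
    exact ih _ (PySem.Dict.nodup_keys_insert _ _ _ (PySem.Dict.nodup_keys_insert _ _ _ hd))

-- the classification loop is three filters
theorem classStep_foldl (items : List (Int × (Bool × Bool))) (acc : List Int × List Int × List Int) :
    items.foldl pvClassStep acc =
      (acc.1 ++ (items.filter (fun kv => kv.2.1 && !kv.2.2)).map Prod.fst,
       acc.2.1 ++ (items.filter (fun kv => kv.2.1 && kv.2.2)).map Prod.fst,
       acc.2.2 ++ (items.filter (fun kv => !kv.2.1)).map Prod.fst) := by
  induction items generalizing acc with
  | nil => simp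
  | cons kv rest ih =>
    obtain ⟨k, a, b⟩ := kv
    cases a <;> cases b <;> simp [pvClassStep, ih, List.append_assoc]

-- membership in a filtered projection of the items
theorem mem_filter_map_fst (items : List (Int × (Bool × Bool))) (c : Int × (Bool × Bool) → Bool)
    (x : Int) : x ∈ (items.filter c).map Prod.fst ↔ ∃ v, (x, v) ∈ items ∧ c (x, v) = true := by
  simp only [List.mem_map, List.mem_filter]
  constructor
  · rintro ⟨⟨k, v⟩, ⟨hm, hc⟩, rfl⟩; exact ⟨v, hm, hc⟩
  · rintro ⟨v, hm, hc⟩; exact ⟨(x, v), ⟨hm, hc⟩, rfl⟩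

theorem nodup_filter_map_fst (items : List (Int × (Bool × Bool))) (c : Int × (Bool × Bool) → Bool)
    (h : (items.map Prod.fst).Nodup) : ((items.filter c).map Prod.fst).Nodup :=
  h.sublist (List.Sublist.map Prod.fst List.filter_sublist)

-- characterisation of B's bucket membership, for the final dict built from empty
theorem mem_bucket (links : List (List Int)) (c : Int × (Bool × Bool) → Bool) (x : Int) :
    (x ∈ (((links.foldl pvFlagStep PySem.Dict.empty).items.filter c).map Prod.fst)) ↔
      ((x ∈ links.map (fun l => (pvUnpackA l).1) ∨ x ∈ links.map (fun l => (pvUnpackA l).2)) ∧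
        c (x, (decide (x ∈ links.map (fun l => (pvUnpackA l).1)),
               decide (x ∈ links.map (fun l => (pvUnpackA l).2)))) = true) := by
  rw [mem_filter_map_fst]
  have hnd := nodup_keys_flags links PySem.Dict.empty PySem.Dict.nodup_keys_empty
  constructor
  · rintro ⟨v, hm, hc⟩
    have := PySem.Dict.get?_of_mem_items _ hm hnd
    rw [get?_flags, pvUnpackB_eq, PySem.Dict.get?_empty] at this
    unfold pvComb at this
    split at this
    · next hcond =>
      simp only [Option.some.injEq] at this
      subst this
      simp only [Option.isSome_none, Bool.or_false, Bool.or_eq_true, decide_eq_true_eq] at hcond ⊢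
      simp only [Option.getD_none, Bool.false_or] at hc ⊢
      exact ⟨hcond, hc⟩
    · exact absurd this (by simp)
  · rintro ⟨hmem, hc⟩
    refine ⟨(decide (x ∈ links.map (fun l => (pvUnpackA l).1)),
             decide (x ∈ links.map (fun l => (pvUnpackA l).2))), ?_, hc⟩
    apply PySem.Dict.mem_items_of_get?_eq_some _
    rw [get?_flags, pvUnpackB_eq, PySem.Dict.get?_empty]
    unfold pvComb
    have : (decide (x ∈ links.map (fun l => (pvUnpackA l).1)) ||
        decide (x ∈ links.map (fun l => (pvUnpackA l).2)) || (none : Option (Bool × Bool)).isSome) = true := by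
      simpa using hmem
    rw [if_pos this]
    simp

-- the two programs fill each of the three buckets with the same Nodup members,
-- hence the sorted lists coincide
theorem sorted_bucket_eq (xs ys : List Int) (hx : xs.Nodup) (hy : ys.Nodup)
    (h : ∀ a, a ∈ xs ↔ a ∈ ys) :
    PySem.List.sorted xs (fun x => x) false = PySem.List.sorted ys (fun x => x) false :=
  PySem.List.sorted_eq_sorted_of_perm xs ys _ (fun _ _ h => h)
    ((List.perm_ext_iff_of_nodup hx hy).2 h)

-- ===== VERDICT (by name: the statement is the Claim_ definition above) =====
theorem parse_topology_py_spec : Claim_equal_parse_topology_py := by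
  intro links _ _
  unfold Spec_parse_topology_py
  simp only [parse_topology_py, parse_topology_py_alt, classStep_foldl, List.nil_append]
  have hkeys : ((links.foldl pvFlagStep PySem.Dict.empty).items.map Prod.fst).Nodup :=
    nodup_keys_flags links PySem.Dict.empty PySem.Dict.nodup_keys_empty
  have hofS := PySem.Set.nodup_ofList (links.map (fun l => (pvUnpackA l).1))
  have hofD := PySem.Set.nodup_ofList (links.map (fun l => (pvUnpackA l).2))
  refine List.ext_getElem (by simp) ?_
  intro i h1 h2
  simp only [List.length_cons, List.length_nil] at h2
  interval_cases i <;> simp only [List.getElem_cons_zero, List.getElem_cons_succ, Prod.mk.injEq] <;>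
    refine ⟨trivial, sorted_bucket_eq _ _ ?_ (nodup_filter_map_fst _ _ hkeys) ?_⟩
  · exact PySem.Set.nodup_diff _ _ hofS
  · intro a
    rw [mem_bucket, PySem.Set.mem_diff, PySem.Set.mem_ofList, PySem.Set.mem_ofList]
    by_cases hS : a ∈ links.map (fun l => (pvUnpackA l).1) <;>
      by_cases hD : a ∈ links.map (fun l => (pvUnpackA l).2) <;> simp [hS, hD]
  · exact PySem.Set.nodup_diff _ _ (PySem.Set.nodup_diff _ _
      (nodup_allIds links PySem.Set.empty List.nodup_nil))
  · intro a
    rw [mem_bucket, PySem.Set.mem_diff, PySem.Set.mem_diff, mem_allIds,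
      PySem.Set.mem_diff, PySem.Set.mem_diff]
    simp only [PySem.Set.mem_ofList]
    by_cases hS : a ∈ links.map (fun l => (pvUnpackA l).1) <;>
      by_cases hD : a ∈ links.map (fun l => (pvUnpackA l).2) <;> simp [hS, hD]
  · exact PySem.Set.nodup_diff _ _ hofD
  · intro a
    rw [mem_bucket, PySem.Set.mem_diff, PySem.Set.mem_ofList, PySem.Set.mem_ofList]
    by_cases hS : a ∈ links.map (fun l => (pvUnpackA l).1) <;>
      by_cases hD : a ∈ links.map (fun l => (pvUnpackA l).2) <;> simp [hS, hD]
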